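-- pv_equiv track=rewrite | github.com/latekvo/EmbeddingsInLangchain | utils.py | is_text_junk
-- ===== SOURCE A (Python) =====
-- def is_text_junk(text: str):
--     # checks if text contains any of junky keywords eg: privacy policy, subscribe, cookies etc.
--     # do not expand this list, it has to be small to be efficient, and these words are grouped either way.
--     trigger_list = [
--         "sign in",
--         "privacy policy",
--         "skip to",
--         "newsletter",
--         "subscribe",
--         "related tags",
--         "share price",
--     ]
--     low_text = text.lower()
--     for trigger in trigger_list:
--         if trigger in low_text:
--             return True
--     return False
-- ===== SOURCE B (Python) =====
-- TRIGGERS = (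
--     "sign in",
--     "privacy policy",
--     "skip to",
--     "newsletter",
--     "subscribe",
--     "related tags",
--     "share price",
-- )
--
--
-- def is_text_junk(text: str):
--     # single left-to-right scan over positions: at each position try every
--     # trigger as a prefix of the remaining suffix (instead of one full
--     # substring search per trigger).
--     low = text.lower()
--     for i in range(len(low) + 1):
--         for trig in TRIGGERS:
--             if low.startswith(trig, i):
--                 return True
--     return False
-- ===== Notes on version B (the rewrite author's own statement) =====
-- stated objective: alternative
-- what changed: Replaces the per-keyword substring-containment loop by a single scan over text positions that tries all seven triggers as a prefix at each position (one pass over the text instead of seven substring searches).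
import Mathlib
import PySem

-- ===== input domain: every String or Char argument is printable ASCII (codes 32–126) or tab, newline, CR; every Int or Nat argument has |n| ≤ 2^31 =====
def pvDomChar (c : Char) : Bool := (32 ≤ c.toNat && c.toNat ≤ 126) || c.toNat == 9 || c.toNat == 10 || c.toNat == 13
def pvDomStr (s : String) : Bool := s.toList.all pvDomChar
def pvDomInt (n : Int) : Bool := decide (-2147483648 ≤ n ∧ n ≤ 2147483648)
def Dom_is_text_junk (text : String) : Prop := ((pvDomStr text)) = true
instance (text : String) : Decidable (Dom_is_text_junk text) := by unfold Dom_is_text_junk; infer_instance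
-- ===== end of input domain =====

-- B replaces the per-keyword substring loop by one scan over positions trying every trigger as a prefix there (alternative, same cost).

-- ===== PORT A =====
def aTriggerList : List String :=
  ["sign in", "privacy policy", "skip to", "newsletter", "subscribe", "related tags", "share price"]

def is_text_junk (text : String) : Bool :=
  let low_text := PySem.Str.lower text
  -- for trigger in trigger_list: if trigger in low_text: return True; return False
  aTriggerList.any (fun trigger => PySem.Str.isIn trigger low_text)

-- ===== PORT B =====
def bTriggers : List (List Char) :=
  ["sign in".toList, "privacy policy".toList, "skip to".toList, "newsletter".toList,
   "subscribe".toList, "related tags".toList, "share price".toList]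

-- low.startswith(trig, i) with 0 <= i <= len(low) is exactly low[i:].startswith(trig)
def is_text_junk_alt (text : String) : Bool :=
  let low := PySem.Chars.lower text.toList
  (List.range (low.length + 1)).any
    (fun i => bTriggers.any (fun trig => PySem.Chars.startswith (low.drop i) trig))

-- ===== PRECONDITION & SPEC =====
def Spec_is_text_junk (text : String) (out : Bool) : Prop := out = is_text_junk_alt text
instance (text : String) (out : Bool) : Decidable (Spec_is_text_junk text out) := by unfold Spec_is_text_junk; infer_instance

-- ===== CLAIM (what is proved, stated in full; the proofs are below) =====
def Claim_equal_is_text_junk : Prop := ∀ (text : String), Dom_is_text_junk text → Spec_is_text_junk text (is_text_junk text)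

-- ===== LEMMAS AND PROOFS =====
-- 'sub in s' holds iff some position i <= len s has sub as a prefix of s.drop i
theorem isIn_eq_range_any (s sub : List Char) :
    PySem.Chars.isIn sub s =
      (List.range (s.length + 1)).any (fun i => PySem.Chars.startswith (s.drop i) sub) := by
  rw [Bool.eq_iff_iff]
  constructor
  · intro h
    obtain ⟨j, hj⟩ := (PySem.Chars.exists_prefix_drop_iff_isIn sub s).mpr h
    rw [List.any_eq_true]
    refine ⟨min j s.length, List.mem_range.mpr (by omega), ?_⟩
    rw [PySem.Chars.startswith_iff]
    by_cases hle : j ≤ s.length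
    · simpa [min_eq_left hle] using hj
    · have hnil : s.drop j = ([] : List Char) := List.drop_eq_nil_of_le (by omega)
      have hsub : sub = [] := List.eq_nil_of_prefix_nil (hnil ▸ hj)
      simp [hsub]
  · intro h
    rw [List.any_eq_true] at h
    obtain ⟨i, _, hi⟩ := h
    rw [PySem.Chars.startswith_iff] at hi
    exact (PySem.Chars.exists_prefix_drop_iff_isIn sub s).mp ⟨i, hi⟩

theorem ports_agree (text : String) : is_text_junk text = is_text_junk_alt text := by
  unfold is_text_junk is_text_junk_alt
  simp only [PySem.Str.isIn_eq, PySem.Str.toList_lower]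
  rw [Bool.eq_iff_iff]
  simp only [List.any_eq_true]
  constructor
  · rintro ⟨trig, htr, hIn⟩
    rw [isIn_eq_range_any, List.any_eq_true] at hIn
    obtain ⟨i, hi, hsw⟩ := hIn
    exact ⟨i, hi, trig.toList, by fin_cases htr <;> simp [bTriggers], hsw⟩
  · rintro ⟨i, hi, trigL, htrL, hsw⟩
    have hmem : ∀ trigL ∈ bTriggers, ∃ trig ∈ aTriggerList, trig.toList = trigL := by
      intro t ht
      fin_cases ht <;> exact ⟨_, by simp [aTriggerList], rfl⟩
    obtain ⟨trig, htr, rfl⟩ := hmem trigL htrL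
    refine ⟨trig, htr, ?_⟩
    rw [isIn_eq_range_any, List.any_eq_true]
    exact ⟨i, hi, hsw⟩

-- ===== VERDICT (by name: the statement is the Claim_ definition above) =====
theorem is_text_junk_spec : Claim_equal_is_text_junk := by
  intro text _
  exact ports_agree text
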